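-- pv_equiv track=rewrite | github.com/yyangcg/... | yichemodel/feature_engineering.py | get_user_label
-- ===== SOURCE A (Python) =====
-- def get_user_label(userid, interest,label):
--     '''
--
--     :param userid_raw:
--     :param appname_raw:
--     :param label:
--     :return:
--     '''
--     label_dict = {}
--     for user in userid:
--         label_dict[user] = 0
--     for i in range(len(interest)):
--         if interest[i] == label:
--             label_dict[userid[i]] = 1
--     return label_dict
-- ===== SOURCE B (Python) =====
-- def get_user_label(userid, interest, label):
--     def hit(u):
--         return any(interest[i] == label and userid[i] == u
--                    for i in range(len(interest)))
--     return {u: int(hit(u)) for u in dict.fromkeys(userid)}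
-- ===== Notes on version B (the rewrite author's own statement) =====
-- stated objective: alternative
-- what changed: Instead of A's zero-init dict plus in-place marking pass over interest, B deduplicates userid once and computes each distinct user's flag independently by searching the interest indices with any(), so no dict is ever mutated after creation.
import Mathlib
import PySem

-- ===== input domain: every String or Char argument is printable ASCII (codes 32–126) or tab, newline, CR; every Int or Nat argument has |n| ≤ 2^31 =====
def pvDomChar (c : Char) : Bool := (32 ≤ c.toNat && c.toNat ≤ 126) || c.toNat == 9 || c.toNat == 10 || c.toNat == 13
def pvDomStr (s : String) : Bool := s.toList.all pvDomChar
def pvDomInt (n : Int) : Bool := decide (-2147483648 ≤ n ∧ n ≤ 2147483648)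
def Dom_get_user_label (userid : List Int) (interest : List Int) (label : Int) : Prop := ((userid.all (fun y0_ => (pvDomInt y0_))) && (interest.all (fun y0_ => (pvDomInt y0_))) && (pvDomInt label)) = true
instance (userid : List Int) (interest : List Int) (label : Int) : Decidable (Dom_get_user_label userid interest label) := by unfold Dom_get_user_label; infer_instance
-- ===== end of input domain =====

-- B drops A's zero-init dict + in-place marking pass: it deduplicates userid once and
-- computes each distinct user's flag independently with a search over interest (objective: alternative).


-- ===== PORT A =====
-- label_dict = {}; for user in userid: label_dict[user] = 0
-- for i in range(len(interest)): if interest[i] == label: label_dict[userid[i]] = 1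
-- (userid[i] out of range = IndexError: pyGet? = none there; those inputs are excluded by Pre_)
def get_user_label (userid : List Int) (interest : List Int) (label : Int) : List (Int × Int) :=
  let d0 : PySem.Dict Int Int := userid.foldl (fun d user => d.insert user 0) PySem.Dict.empty
  let d1 : PySem.Dict Int Int :=
    (PySem.List.pyRange 0 (PySem.List.len interest) 1).foldl
      (fun d i =>
        if PySem.List.pyGet? interest i = some label then
          match PySem.List.pyGet? userid i with
          | some u => d.insert u 1
          | none => d          -- IndexError in Python; outside Pre_
        else d) d0
  d1.items

-- ===== PORT B =====
-- def hit(u): return any(interest[i] == label and userid[i] == u for i in range(len(interest)))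
-- return {u: int(hit(u)) for u in dict.fromkeys(userid)}
-- (the short-circuit 'and' can raise IndexError on userid[i] in Python; pyGet? = none makes the
--  conjunct false here — those inputs are excluded by Pre_)
def get_user_label_alt (userid : List Int) (interest : List Int) (label : Int) : List (Int × Int) :=
  let hit : Int → Bool := fun u =>
    (PySem.List.pyRange 0 (PySem.List.len interest) 1).any
      (fun i => PySem.List.pyGet? interest i == some label && PySem.List.pyGet? userid i == some u)
  ((PySem.List.dedup userid).foldl
    (fun d u => d.insert u (if hit u then 1 else 0))
    (PySem.Dict.empty : PySem.Dict Int Int)).items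

-- ===== PRECONDITION & SPEC =====
-- Pre_ excludes exactly the inputs where Python A raises IndexError: an index i with
-- interest[i] == label but i ≥ len(userid).
def Pre_get_user_label (userid : List Int) (interest : List Int) (label : Int) : Prop :=
  ∀ i : Nat, (h : i < interest.length) → interest[i] = label → i < userid.length
instance (userid : List Int) (interest : List Int) (label : Int) : Decidable (Pre_get_user_label userid interest label) := by unfold Pre_get_user_label; infer_instance

def pvWitness_get_user_label : List Int × List Int × Int := ([3, 7, 3], [5, 9, 5], 5)

def Spec_get_user_label (userid : List Int) (interest : List Int) (label : Int) (out : List (Int × Int)) : Prop := out = get_user_label_alt userid interest label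
instance (userid : List Int) (interest : List Int) (label : Int) (out : List (Int × Int)) : Decidable (Spec_get_user_label userid interest label out) := by unfold Spec_get_user_label; infer_instance

-- ===== CLAIM (what is proved, stated in full; the proofs are below) =====
def Claim_equal_get_user_label : Prop := ∀ (userid : List Int) (interest : List Int) (label : Int), Dom_get_user_label userid interest label → Pre_get_user_label userid interest label → Spec_get_user_label userid interest label (get_user_label userid interest label)

-- ===== LEMMAS AND PROOFS =====

-- "index i is a hit for user u": interest[i] == label and userid[i] == u
abbrev hitAt (userid : List Int) (interest : List Int) (label : Int) (i u : Int) : Prop :=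
  PySem.List.pyGet? interest i = some label ∧ PySem.List.pyGet? userid i = some u

-- body of A's second loop
def stepA (userid interest : List Int) (label : Int) (d : PySem.Dict Int Int) (i : Int) :
    PySem.Dict Int Int :=
  if PySem.List.pyGet? interest i = some label then
    match PySem.List.pyGet? userid i with
    | some u => d.insert u 1
    | none => d
  else d

-- B's per-user search is true exactly when some index in L is a hit for u
theorem hit_eq_true_iff (userid interest : List Int) (label : Int) (L : List Int) (u : Int) :
    (L.any (fun i => PySem.List.pyGet? interest i == some label &&
        PySem.List.pyGet? userid i == some u)) = true ↔
      ∃ i ∈ L, hitAt userid interest label i u := by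
  simp [List.any_eq_true, hitAt]

theorem get?_foldl_stepA (userid interest : List Int) (label : Int) (L : List Int)
    (d : PySem.Dict Int Int) (u : Int) :
    (L.foldl (stepA userid interest label) d).get? u =
      if ∃ i ∈ L, hitAt userid interest label i u then some 1 else d.get? u := by
  induction L generalizing d with
  | nil => simp
  | cons x L ih =>
    rw [List.foldl_cons, ih]
    by_cases hL : ∃ i ∈ L, hitAt userid interest label i u
    · obtain ⟨i, hi, h⟩ := hL
      rw [if_pos ⟨i, hi, h⟩, if_pos ⟨i, List.mem_cons_of_mem x hi, h⟩]
    · rw [if_neg hL]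
      by_cases hx : hitAt userid interest label x u
      · rw [if_pos ⟨x, List.mem_cons_self, hx⟩]
        obtain ⟨h1, h2⟩ := hx
        simp only [stepA, if_pos h1, h2]
        exact PySem.Dict.get?_insert_self _ _ _
      · have hno : ¬ ∃ i ∈ x :: L, hitAt userid interest label i u := by
          rintro ⟨i, hi, h⟩
          rcases List.mem_cons.mp hi with rfl | hi'
          · exact hx h
          · exact hL ⟨i, hi', h⟩
        rw [if_neg hno]
        simp only [stepA, hitAt, not_and] at hx ⊢
        split
        · rename_i hint
          rcases hget : PySem.List.pyGet? userid x with _ | v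
          · rfl
          · have hne : u ≠ v := fun h => hx hint (h ▸ hget)
            exact PySem.Dict.get?_insert_of_ne d 1 hne
        · rfl

-- keys of A's second loop stay the keys of d0 (every inserted key is an element of userid,
-- hence already a key of d0)
theorem keys_foldl_stepA (userid interest : List Int) (label : Int) (L : List Int)
    (d : PySem.Dict Int Int) (hd : ∀ u ∈ userid, d.contains u = true) :
    (L.foldl (stepA userid interest label) d).keys = d.keys := by
  induction L generalizing d with
  | nil => rfl
  | cons x L ih =>
    simp only [List.foldl_cons]
    have hstep : (stepA userid interest label d x).keys = d.keys := by
      simp only [stepA]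
      split
      · rcases hget : PySem.List.pyGet? userid x with _ | v
        · rfl
        · have hv : v ∈ userid := PySem.List.mem_of_pyGet?_eq_some userid hget
          exact PySem.Dict.keys_insert_of_contains d 1 (hd v hv)
      · rfl
    have hd' : ∀ u ∈ userid, (stepA userid interest label d x).contains u = true := by
      intro u hu
      rw [PySem.Dict.contains_iff_mem_keys, hstep, ← PySem.Dict.contains_iff_mem_keys]
      exact hd u hu
    rw [ih _ hd', hstep]

-- get? of a fold inserting a key-determined value
theorem get?_foldl_insert_fun (g : Int → Int) (l : List Int) (d : PySem.Dict Int Int) (u : Int) :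
    (l.foldl (fun d x => d.insert x (g x)) d).get? u =
      if u ∈ l then some (g u) else d.get? u := by
  induction l generalizing d with
  | nil => simp
  | cons x l ih =>
    simp only [List.foldl_cons, ih, List.mem_cons]
    by_cases hl : u ∈ l
    · simp [hl]
    · by_cases hx : u = x
      · subst hx; simp [hl, PySem.Dict.get?_insert_self]
      · simp [hl, hx, PySem.Dict.get?_insert_of_ne d _ hx]

theorem keys_foldl_insert_fun (g : Int → Int) (l : List Int) :
    (l.foldl (fun d x => d.insert x (g x)) (PySem.Dict.empty : PySem.Dict Int Int)).keys =
      PySem.Set.ofList l := by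
  rw [PySem.Dict.keys_foldl_insert]
  rfl

-- two dicts with equal (nodup) key lists and equal lookups are equal
theorem dict_ext (d1 d2 : PySem.Dict Int Int) (hk : d1.keys = d2.keys)
    (hn : d1.keys.Nodup) (hg : ∀ k, d1.get? k = d2.get? k) : d1 = d2 := by
  obtain ⟨l1⟩ := d1
  obtain ⟨l2⟩ := d2
  simp only [PySem.Dict.keys_mk] at hk hn
  congr 1
  induction l1 generalizing l2 with
  | nil => cases l2 with
    | nil => rfl
    | cons p l2 => simp at hk
  | cons p l1 ih =>
    cases l2 with
    | nil => simp at hk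
    | cons q l2 =>
      obtain ⟨k1, v1⟩ := p
      obtain ⟨k2, v2⟩ := q
      simp only [List.map_cons, List.cons.injEq] at hk
      obtain ⟨rfl, hk⟩ := hk
      have hv : v1 = v2 := by
        have h := hg k1
        simp only [PySem.Dict.get?_mk_cons, beq_self_eq_true, if_true] at h
        exact Option.some.inj h
      subst hv
      simp only [List.map_cons, List.nodup_cons] at hn
      congr 1
      apply ih hn.2 l2 hk
      intro k
      by_cases hkk : k = k1
      · subst hkk
        have h1 : (PySem.Dict.mk l1).get? k = none := by
          rw [PySem.Dict.get?_eq_none_iff_not_mem_keys]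
          simpa using hn.1
        have h2 : (PySem.Dict.mk l2).get? k = none := by
          rw [PySem.Dict.get?_eq_none_iff_not_mem_keys]
          simp only [PySem.Dict.keys_mk] at *
          rw [← hk]
          simpa using hn.1
        rw [h1, h2]
      · have := hg k
        simp only [PySem.Dict.get?_mk_cons] at this
        rwa [if_neg (by simpa using (Ne.symm hkk)), if_neg (by simpa using (Ne.symm hkk))] at this

-- ===== VERDICT (by name: the statement is the Claim_ definition above) =====
theorem get_user_label_spec : Claim_equal_get_user_label := by
  intro userid interest label _ _
  unfold Spec_get_user_label get_user_label get_user_label_alt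
  set L := PySem.List.pyRange 0 (PySem.List.len interest) 1 with hL
  set hit : Int → Bool := fun u =>
    L.any (fun i => PySem.List.pyGet? interest i == some label &&
      PySem.List.pyGet? userid i == some u) with hhit
  show (PySem.Dict.items
      (L.foldl (stepA userid interest label)
        (userid.foldl (fun d user => d.insert user 0) PySem.Dict.empty))) =
    (PySem.Dict.items
      ((PySem.List.dedup userid).foldl
        (fun d u => d.insert u (if hit u = true then 1 else 0)) PySem.Dict.empty))
  refine congrArg PySem.Dict.items ?_
  set d0 : PySem.Dict Int Int := userid.foldl (fun d user => d.insert user 0) PySem.Dict.empty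
    with hd0
  have hd0keys : d0.keys = PySem.Set.ofList userid := keys_foldl_insert_fun (fun _ => 0) userid
  have hd0get : ∀ u, d0.get? u = if u ∈ userid then some 0 else none :=
    fun u => get?_foldl_insert_fun (fun _ => 0) userid PySem.Dict.empty u
  have hd0contains : ∀ u ∈ userid, d0.contains u = true := by
    intro u hu
    rw [PySem.Dict.contains_iff_mem_keys, hd0keys]
    exact (PySem.Set.mem_ofList userid u).mpr hu
  have hBkeys : ((PySem.List.dedup userid).foldl
      (fun d u => d.insert u (if hit u = true then 1 else 0))
      (PySem.Dict.empty : PySem.Dict Int Int)).keys = PySem.Set.ofList userid := by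
    rw [keys_foldl_insert_fun (fun u => if hit u = true then 1 else 0) (PySem.List.dedup userid),
      PySem.List.dedup_eq_ofList, PySem.Set.ofList_ofList]
  apply dict_ext
  · rw [keys_foldl_stepA userid interest label L d0 hd0contains, hd0keys, hBkeys]
  · rw [keys_foldl_stepA userid interest label L d0 hd0contains, hd0keys]
    exact PySem.Set.nodup_ofList userid
  · intro u
    rw [get?_foldl_stepA,
      get?_foldl_insert_fun (fun u => if hit u = true then 1 else 0)
        (PySem.List.dedup userid) PySem.Dict.empty u,
      hd0get u, PySem.Dict.get?_empty]
    simp only [PySem.List.mem_dedup]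
    by_cases hhitu : ∃ i ∈ L, hitAt userid interest label i u
    · have htrue : hit u = true := (hit_eq_true_iff userid interest label L u).mpr hhitu
      have hmem : u ∈ userid := by
        obtain ⟨i, _, _, h2⟩ := hhitu
        exact PySem.List.mem_of_pyGet?_eq_some userid h2
      simp [hhitu, hmem, htrue]
    · have hfalse : ¬ hit u = true := fun h =>
        hhitu ((hit_eq_true_iff userid interest label L u).mp h)
      by_cases hmem : u ∈ userid
      · simp [hhitu, hmem, hfalse]
      · simp [hhitu, hmem]
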